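-- pv_equiv track=rewrite | github.com/JovanaGolijanin/Python | 17.py | kreiraj
-- ===== SOURCE A (Python) =====
-- def kreiraj(n:int)->list:
--     rez = []
--     i=0
--     zbir = 0
--     while i<=n:
--         zbir += i
--         kvadrat = pow(zbir,2)
--         rez.append((i,kvadrat))
--         i+=1
--     return rez
-- ===== SOURCE B (Python) =====
-- def kreiraj(n: int) -> list:
--     return [(i, (i * (i + 1) // 2) ** 2) for i in range(n + 1)]
-- ===== Notes on version B (the rewrite author's own statement) =====
-- stated objective: idiomatic
-- what changed: Replaces the while-loop carrying a running-sum accumulator with a stateless comprehension computing each pair directly from the triangular-number closed form i*(i+1)//2.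
import Mathlib
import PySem

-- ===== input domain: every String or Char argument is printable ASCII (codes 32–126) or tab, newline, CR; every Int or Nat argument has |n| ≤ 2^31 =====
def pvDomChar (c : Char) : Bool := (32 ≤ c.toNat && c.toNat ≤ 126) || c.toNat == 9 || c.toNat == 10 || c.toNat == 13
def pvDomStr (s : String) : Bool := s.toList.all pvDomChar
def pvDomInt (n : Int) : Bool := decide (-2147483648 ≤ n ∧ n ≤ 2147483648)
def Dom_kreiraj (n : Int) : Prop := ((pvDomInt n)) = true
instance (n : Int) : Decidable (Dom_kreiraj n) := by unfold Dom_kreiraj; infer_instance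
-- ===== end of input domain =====

-- B replaces A's while-loop with a running-sum accumulator by a stateless comprehension
-- using the triangular-number closed form; same values, same cost.

-- ===== PORT A =====
-- while i<=n: zbir += i; rez.append((i, zbir**2)); i+=1  — fuel (n+1).toNat bounds the iterations
def kreirajGo (n : Int) : Nat → Int → Int → List (Int × Int)
  | 0, _, _ => []
  | fuel + 1, i, zbir =>
    if i ≤ n then
      let zbir' := zbir + i
      (i, zbir' ^ 2) :: kreirajGo n fuel (i + 1) zbir'
    else []

def kreiraj (n : Int) : List (Int × Int) := kreirajGo n (n + 1).toNat 0 0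

-- ===== PORT B =====
def kreiraj_alt (n : Int) : List (Int × Int) :=
  (PySem.List.pyRange 0 (n + 1) 1).map (fun i => (i, (PySem.Int.floordiv (i * (i + 1)) 2) ^ 2))

-- ===== PRECONDITION & SPEC =====
def Spec_kreiraj (n : Int) (out : List (Int × Int)) : Prop := out = kreiraj_alt n
instance (n : Int) (out : List (Int × Int)) : Decidable (Spec_kreiraj n out) := by unfold Spec_kreiraj; infer_instance

-- ===== CLAIM (what is proved, stated in full; the proofs are below) =====
def Claim_equal_kreiraj : Prop := ∀ (n : Int), Dom_kreiraj n → Spec_kreiraj n (kreiraj n)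

-- ===== LEMMAS AND PROOFS =====

theorem kreiraj_tri (i c : Int) (h : 2 * c = i * (i + 1)) :
    PySem.Int.floordiv (i * (i + 1)) 2 = c := by
  rw [PySem.Int.floordiv_eq_ediv_of_pos (by omega)]
  omega

theorem kreirajGo_eq (n : Int) (fuel : Nat) (i zbir : Int)
    (hfuel : (n + 1 - i).toNat ≤ fuel) (hz : 2 * zbir = i * (i - 1)) :
    kreirajGo n fuel i zbir =
      (PySem.List.pyRange i (n + 1) 1).map
        (fun j => (j, (PySem.Int.floordiv (j * (j + 1)) 2) ^ 2)) := by
  induction fuel generalizing i zbir with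
  | zero =>
    have : n + 1 ≤ i := by omega
    rw [PySem.List.pyRange_one_eq_nil this]
    rfl
  | succ f ih =>
    by_cases h : i ≤ n
    · rw [PySem.List.pyRange_one_cons (by omega)]
      simp only [kreirajGo, if_pos h, List.map_cons]
      rw [ih (i + 1) (zbir + i) (by omega) (by linear_combination hz)]
      have : PySem.Int.floordiv (i * (i + 1)) 2 = zbir + i :=
        kreiraj_tri i (zbir + i) (by linear_combination hz)
      rw [this]
    · rw [PySem.List.pyRange_one_eq_nil (by omega)]
      simp [kreirajGo, h]

-- ===== VERDICT (by name: the statement is the Claim_ definition above) =====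
theorem kreiraj_spec : Claim_equal_kreiraj := by
  intro n _
  unfold Spec_kreiraj kreiraj kreiraj_alt
  exact kreirajGo_eq n _ 0 0 (by omega) (by ring)
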